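-- pv_equiv track=rewrite | github.com/xph9876/RNA-mediated_DSB_repair | utils/old_code/alignment_utils_old.py | get_variation_pos
-- ===== SOURCE A (Python) =====
-- def get_variation_pos(ref_align, read_align):
--   assert len(ref_align) == len(read_align), "Alignment strings must be the same length"
--
--   ref_pos = 1
--   ins_pos = []
--   del_pos = []
--   subst_pos = []
--   for i in range(len(ref_align)):
--     if ref_align[i] == '-':
--       ins_pos.append(ref_pos - 1) # insertions are mapped to the previous reference positition
--     elif read_align[i] == '-':
--       del_pos.append(ref_pos)
--       ref_pos += 1
--     elif ref_align[i] != read_align[i]: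
--       subst_pos.append(ref_pos)
--       ref_pos += 1
--     else: # match
--       ref_pos += 1
--   return ins_pos, del_pos, subst_pos
-- ===== SOURCE B (Python) =====
-- def get_variation_pos(ref_align, read_align):
--   assert len(ref_align) == len(read_align), "Alignment strings must be the same length"
--   n = len(ref_align)
--   # prefix table: ref_positions[i] = 1 + number of non-gap reference chars before i
--   ref_positions = [1] * (n + 1)
--   for i in range(n):
--     ref_positions[i + 1] = ref_positions[i] + (0 if ref_align[i] == '-' else 1)
--   ins_pos = [ref_positions[i] - 1 for i in range(n) if ref_align[i] == '-']
--   del_pos = [ref_positions[i] for i in range(n)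
--              if ref_align[i] != '-' and read_align[i] == '-']
--   subst_pos = [ref_positions[i] for i in range(n)
--                if ref_align[i] != '-' and read_align[i] != '-' and ref_align[i] != read_align[i]]
--   return ins_pos, del_pos, subst_pos
-- ===== Notes on version B (the rewrite author's own statement) =====
-- stated objective: alternative
-- what changed: Replaces the single accumulating loop with a precomputed prefix table of reference positions plus three separate filtered passes, one per output list.
import Mathlib
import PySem

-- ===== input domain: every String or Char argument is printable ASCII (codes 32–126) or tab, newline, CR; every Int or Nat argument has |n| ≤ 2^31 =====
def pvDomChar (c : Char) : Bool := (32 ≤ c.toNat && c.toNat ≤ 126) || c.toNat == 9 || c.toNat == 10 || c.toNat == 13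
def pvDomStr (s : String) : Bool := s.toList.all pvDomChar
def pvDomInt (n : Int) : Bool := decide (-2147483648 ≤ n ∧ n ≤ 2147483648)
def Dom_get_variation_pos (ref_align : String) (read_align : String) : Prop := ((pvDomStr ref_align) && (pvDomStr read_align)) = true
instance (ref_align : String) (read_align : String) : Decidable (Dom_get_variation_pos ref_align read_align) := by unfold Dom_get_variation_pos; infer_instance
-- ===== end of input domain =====

-- B replaces A's single accumulating loop by a precomputed prefix table of reference
-- positions plus three separate filtered passes (alternative decomposition, same cost).


-- ===== PORT A =====
-- A's loop over i with state (ref_pos, ins, del, subst), transcribed as structural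
-- recursion over the paired characters; results are built in the same order.
def goA (ps : List (Char × Char)) (ref_pos : Int) : List Int × List Int × List Int :=
  match ps with
  | [] => ([], [], [])
  | (a, b) :: rest =>
    if a = '-' then
      let (i, d, s) := goA rest ref_pos
      ((ref_pos - 1) :: i, d, s)
    else if b = '-' then
      let (i, d, s) := goA rest (ref_pos + 1)
      (i, ref_pos :: d, s)
    else if a ≠ b then
      let (i, d, s) := goA rest (ref_pos + 1)
      (i, d, ref_pos :: s)
    else
      goA rest (ref_pos + 1)

def get_variation_pos (ref_align : String) (read_align : String) : List Int × List Int × List Int :=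
  goA (ref_align.toList.zip read_align.toList) 1

-- ===== PORT B =====
-- Source B's prefix-table loop: refPositions cs p = [p, p+…] with p incremented per non-gap char
def refPositions (cs : List Char) (p : Int) : List Int :=
  match cs with
  | [] => [p]
  | c :: rest => p :: refPositions rest (p + (if c = '-' then 0 else 1))

def fIns (x : Char × Int) : Option Int :=
  if x.1 = '-' then some (x.2 - 1) else none

def fDel (x : (Char × Char) × Int) : Option Int :=
  if x.1.1 ≠ '-' ∧ x.1.2 = '-' then some x.2 else none

def fSub (x : (Char × Char) × Int) : Option Int :=
  if x.1.1 ≠ '-' ∧ x.1.2 ≠ '-' ∧ x.1.1 ≠ x.1.2 then some x.2 else none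

def get_variation_pos_alt (ref_align : String) (read_align : String) : List Int × List Int × List Int :=
  let r := ref_align.toList
  let d := read_align.toList
  let tbl := refPositions r 1
  ((r.zip tbl).filterMap fIns,
   ((r.zip d).zip tbl).filterMap fDel,
   ((r.zip d).zip tbl).filterMap fSub)

-- ===== PRECONDITION & SPEC =====
-- A raises AssertionError when the two strings have different lengths; Pre_ excludes exactly those inputs.
def Pre_get_variation_pos (ref_align : String) (read_align : String) : Prop :=
  ref_align.toList.length = read_align.toList.length
instance (ref_align : String) (read_align : String) : Decidable (Pre_get_variation_pos ref_align read_align) := by unfold Pre_get_variation_pos; infer_instance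

def pvWitness_get_variation_pos : String × String := ("A-CG", "AGC-")

def Spec_get_variation_pos (ref_align : String) (read_align : String) (out : List Int × List Int × List Int) : Prop := out = get_variation_pos_alt ref_align read_align
instance (ref_align : String) (read_align : String) (out : List Int × List Int × List Int) : Decidable (Spec_get_variation_pos ref_align read_align out) := by unfold Spec_get_variation_pos; infer_instance

-- ===== CLAIM (what is proved, stated in full; the proofs are below) =====
def Claim_equal_get_variation_pos : Prop := ∀ (ref_align : String) (read_align : String), Dom_get_variation_pos ref_align read_align → Pre_get_variation_pos ref_align read_align → Spec_get_variation_pos ref_align read_align (get_variation_pos ref_align read_align)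

-- ===== LEMMAS AND PROOFS =====
theorem goA_eq (r : List Char) : ∀ (d : List Char) (p : Int), r.length = d.length →
    goA (r.zip d) p =
      ((r.zip (refPositions r p)).filterMap fIns,
       ((r.zip d).zip (refPositions r p)).filterMap fDel,
       ((r.zip d).zip (refPositions r p)).filterMap fSub) := by
  induction r with
  | nil =>
    intro d p h
    simp [goA, refPositions]
  | cons a rs ih =>
    intro d p h
    cases d with
    | nil => simp at h
    | cons b ds =>
      simp only [List.length_cons, Nat.add_right_cancel_iff] at h
      simp only [List.zip_cons_cons, refPositions, goA]
      by_cases ha : a = '-'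
      · simp [ha, ih ds p h, fIns, fDel, fSub]
      · by_cases hb : b = '-'
        · simp [ha, hb, ih ds (p + 1) h, fIns, fDel, fSub]
        · by_cases hab : a = b
          · simp [hb, hab, ih ds (p + 1) h, fIns, fDel, fSub]
          · simp [ha, hb, hab, ih ds (p + 1) h, fIns, fDel, fSub]

-- ===== VERDICT (by name: the statement is the Claim_ definition above) =====
theorem get_variation_pos_spec : Claim_equal_get_variation_pos := by
  intro ref_align read_align _ hpre
  unfold Spec_get_variation_pos get_variation_pos get_variation_pos_alt
  exact goA_eq ref_align.toList read_align.toList 1 hpre
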